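-- pv_equiv track=rewrite | github.com/ChanakanStudy/realchemma | backend/app/features/game/service.py | _consume_symbols
-- ===== SOURCE A (Python) =====
-- def _consume_symbols(inventory, selected_symbols):
--     next_inventory = [dict(item) for item in inventory]
--
--     for symbol in selected_symbols:
--         remaining = 1
--         for item in next_inventory:
--             if item.get("id") != symbol or item.get("quantity", 0) <= 0:
--                 continue
--
--             consume_quantity = min(item["quantity"], remaining)
--             item["quantity"] -= consume_quantity
--             remaining -= consume_quantity
--
--             if remaining <= 0:
--                 break
--
--     return [item for item in next_inventory if item.get("quantity", 0) > 0]
-- ===== SOURCE B (Python) =====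
-- from collections import Counter
--
-- def _consume_symbols(inventory, selected_symbols):
--     need = Counter(selected_symbols)
--     result = []
--     for item in inventory:
--         item = dict(item)
--         quantity = item.get("quantity", 0)
--         key = item.get("id")
--         if quantity > 0 and key is not None and need[key] > 0:
--             take = min(quantity, need[key])
--             need[key] -= take
--             quantity -= take
--             item["quantity"] = quantity
--         if quantity > 0:
--             result.append(item)
--     return result
-- ===== Notes on version B (the rewrite author's own statement) =====
-- stated objective: faster
-- what changed: A rescans the whole inventory once per selected symbol; B builds a Counter of the selected symbols once and distributes each id's count greedily in a single pass over the inventory.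
import Mathlib
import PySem

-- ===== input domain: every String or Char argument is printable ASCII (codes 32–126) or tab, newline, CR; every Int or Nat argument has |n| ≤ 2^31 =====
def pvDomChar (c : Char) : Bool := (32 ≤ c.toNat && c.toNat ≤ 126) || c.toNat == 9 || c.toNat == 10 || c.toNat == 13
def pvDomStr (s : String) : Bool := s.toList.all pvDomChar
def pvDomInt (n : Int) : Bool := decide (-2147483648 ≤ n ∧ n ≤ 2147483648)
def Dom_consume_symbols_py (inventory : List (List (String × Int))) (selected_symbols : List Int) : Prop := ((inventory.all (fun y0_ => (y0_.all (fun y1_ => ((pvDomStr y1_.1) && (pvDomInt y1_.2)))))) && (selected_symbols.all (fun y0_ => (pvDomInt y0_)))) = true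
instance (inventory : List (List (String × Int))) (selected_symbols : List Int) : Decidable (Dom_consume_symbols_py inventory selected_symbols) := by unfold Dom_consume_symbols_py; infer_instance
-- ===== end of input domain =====

-- B replaces A's per-symbol rescans of the inventory by one Counter of the symbols and a
-- single pass over the inventory (objective: faster, O(S+N) instead of O(S*N)).

-- ===== PORT A =====
-- inner 'for item in next_inventory' loop with the 'remaining' state and the break
def pvALoop (symbol : Int) (remaining : Int) : List (PySem.Dict String Int) → List (PySem.Dict String Int)
  | [] => []
  | item :: rest =>
    if item.get? "id" ≠ some symbol ∨ item.getD "quantity" 0 ≤ 0 then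
      item :: pvALoop symbol remaining rest
    else
      -- guard ensured the "quantity" key is present with a positive value, so
      -- item["quantity"] = item.getD "quantity" 0 here
      let q := item.getD "quantity" 0
      let consume_quantity := min q remaining
      let item' := item.insert "quantity" (q - consume_quantity)
      let remaining' := remaining - consume_quantity
      if remaining' ≤ 0 then item' :: rest
      else item' :: pvALoop symbol remaining' rest

def consume_symbols_py (inventory : List (List (String × Int))) (selected_symbols : List Int) : List (List (String × Int)) :=
  let next_inventory := inventory.map (fun item => PySem.Dict.ofList item)
  let next_inventory := selected_symbols.foldl (fun inv symbol => pvALoop symbol 1 inv) next_inventory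
  (next_inventory.filter (fun item => item.getD "quantity" 0 > 0)).map (·.items)

-- ===== PORT B =====
-- the body of Source B's single 'for item in inventory' loop; state = (need counter, result)
def pvBStep (st : PySem.Dict Int Int × List (PySem.Dict String Int)) (item0 : List (String × Int)) :
    PySem.Dict Int Int × List (PySem.Dict String Int) :=
  let item := PySem.Dict.ofList item0
  let quantity := item.getD "quantity" 0
  match item.get? "id" with
  | none =>
    (st.1, if quantity > 0 then st.2 ++ [item] else st.2)
  | some key =>
    if quantity > 0 ∧ st.1.getD key 0 > 0 then
      let take := min quantity (st.1.getD key 0)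
      let need := st.1.insert key (st.1.getD key 0 - take)
      let quantity := quantity - take
      let item := item.insert "quantity" quantity
      (need, if quantity > 0 then st.2 ++ [item] else st.2)
    else
      (st.1, if quantity > 0 then st.2 ++ [item] else st.2)

def consume_symbols_py_alt (inventory : List (List (String × Int))) (selected_symbols : List Int) : List (List (String × Int)) :=
  let need := PySem.Dict.counter selected_symbols
  let st := inventory.foldl pvBStep (need, [])
  st.2.map (·.items)

-- ===== PRECONDITION & SPEC =====
def Spec_consume_symbols_py (inventory : List (List (String × Int))) (selected_symbols : List Int) (out : List (List (String × Int))) : Prop := out = consume_symbols_py_alt inventory selected_symbols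
instance (inventory : List (List (String × Int))) (selected_symbols : List Int) (out : List (List (String × Int))) : Decidable (Spec_consume_symbols_py inventory selected_symbols out) := by unfold Spec_consume_symbols_py; infer_instance

-- ===== CLAIM (what is proved, stated in full; the proofs are below) =====
def Claim_equal_consume_symbols_py : Prop := ∀ (inventory : List (List (String × Int))) (selected_symbols : List Int), Dom_consume_symbols_py inventory selected_symbols → Spec_consume_symbols_py inventory selected_symbols (consume_symbols_py inventory selected_symbols)

-- ===== LEMMAS AND PROOFS =====

-- proof-side recursion computing B's result list from a need counter (matches pvBStep step by step)
def pvBPass (need : PySem.Dict Int Int) : List (PySem.Dict String Int) → List (PySem.Dict String Int)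
  | [] => []
  | item :: rest =>
    let quantity := item.getD "quantity" 0
    match item.get? "id" with
    | none => (if quantity > 0 then [item] else []) ++ pvBPass need rest
    | some key =>
      if quantity > 0 ∧ need.getD key 0 > 0 then
        let take := min quantity (need.getD key 0)
        (if quantity - take > 0 then [item.insert "quantity" (quantity - take)] else []) ++
          pvBPass (need.insert key (need.getD key 0 - take)) rest
      else (if quantity > 0 then [item] else []) ++ pvBPass need rest

theorem pvB_fold (items : List (List (String × Int))) :
    ∀ (need : PySem.Dict Int Int) (acc : List (PySem.Dict String Int)),
    (items.foldl pvBStep (need, acc)).2 = acc ++ pvBPass need (items.map (fun i => PySem.Dict.ofList i)) := by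
  induction items with
  | nil => intro need acc; simp [pvBPass]
  | cons item rest ih =>
    intro need acc
    simp only [List.foldl_cons, List.map_cons, pvBPass, pvBStep]
    cases h : (PySem.Dict.ofList item).get? "id" with
    | none =>
      simp only [ih]
      split <;> simp
    | some key =>
      by_cases hg : (PySem.Dict.ofList item).getD "quantity" 0 > 0 ∧ need.getD key 0 > 0
      · simp only [if_pos hg, ih]
        split <;> simp
      · simp only [if_neg hg, ih]
        split <;> simp

-- pvBPass only looks at the counter through getD
theorem pvBPass_congr (L : List (PySem.Dict String Int)) :
    ∀ (n1 n2 : PySem.Dict Int Int), (∀ j, n1.getD j 0 = n2.getD j 0) → pvBPass n1 L = pvBPass n2 L := by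
  induction L with
  | nil => intro n1 n2 _; rfl
  | cons item rest ih =>
    intro n1 n2 h
    simp only [pvBPass]
    cases hid : item.get? "id" with
    | none => rw [ih n1 n2 h]
    | some key =>
      dsimp only
      rw [h key]
      by_cases hg : item.getD "quantity" 0 > 0 ∧ n2.getD key 0 > 0
      · simp only [if_pos hg]
        congr 1
        refine ih _ _ (fun j => ?_)
        by_cases hj : j = key
        · subst hj; rw [PySem.Dict.getD_insert_self, PySem.Dict.getD_insert_self]
        · rw [PySem.Dict.getD_insert, PySem.Dict.getD_insert]; simp only [if_neg hj, h j]
      · simp only [if_neg hg, ih n1 n2 h]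

-- with an exhausted counter, B's pass is exactly A's final filter
theorem pvBPass_zero (L : List (PySem.Dict String Int)) (need : PySem.Dict Int Int)
    (h : ∀ j, need.getD j 0 ≤ 0) :
    pvBPass need L = L.filter (fun item => item.getD "quantity" 0 > 0) := by
  induction L with
  | nil => rfl
  | cons item rest ih =>
    simp only [pvBPass]
    cases hid : item.get? "id" with
    | none =>
      rw [ih]; simp only [List.filter_cons]; split <;> simp_all
    | some key =>
      dsimp only
      have : ¬ (item.getD "quantity" 0 > 0 ∧ need.getD key 0 > 0) := by
        intro ⟨_, hk⟩; exact absurd hk (not_lt.mpr (h key))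
      rw [if_neg this, ih]; simp [List.filter_cons]; split <;> simp_all

-- the main step: consuming one symbol on A's side = one extra unit in B's counter
theorem pvBPass_step (symbol : Int) (L : List (PySem.Dict String Int)) :
    ∀ (n1 n2 : PySem.Dict Int Int),
    (∀ j, n2.getD j 0 = if j = symbol then n1.getD j 0 - 1 else n1.getD j 0) →
    1 ≤ n1.getD symbol 0 →
    pvBPass n2 (pvALoop symbol 1 L) = pvBPass n1 L := by
  induction L with
  | nil => intro n1 n2 _ _; rfl
  | cons item rest ih =>
    intro n1 n2 hrel hpos
    by_cases hskip : item.get? "id" ≠ some symbol ∨ item.getD "quantity" 0 ≤ 0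
    · rw [pvALoop, if_pos hskip]
      simp only [pvBPass]
      cases hid : item.get? "id" with
      | none => rw [ih n1 n2 hrel hpos]
      | some key =>
        dsimp only

        by_cases hq : item.getD "quantity" 0 > 0
        · have hk : key ≠ symbol := by
            rcases hskip with h1 | h2
            · intro he; exact h1 (by rw [hid, he])
            · omega
          have hck : n2.getD key 0 = n1.getD key 0 := by rw [hrel key, if_neg hk]
          rw [hck]
          by_cases hg : item.getD "quantity" 0 > 0 ∧ n1.getD key 0 > 0
          · simp only [if_pos hg]
            congr 1
            refine ih _ _ (fun j => ?_) ?_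
            · by_cases hj : j = key
              · subst hj
                rw [PySem.Dict.getD_insert_self, PySem.Dict.getD_insert, if_pos rfl, if_neg hk]
              · rw [PySem.Dict.getD_insert, if_neg hj, PySem.Dict.getD_insert, if_neg hj, hrel j]
            · rw [PySem.Dict.getD_insert, if_neg (fun h => hk h.symm)]
              exact hpos
          · simp only [if_neg hg]
            rw [ih n1 n2 hrel hpos]
        · have hgf : ¬ (item.getD "quantity" 0 > 0 ∧ n2.getD key 0 > 0) := fun h => hq h.1
          have hgf' : ¬ (item.getD "quantity" 0 > 0 ∧ n1.getD key 0 > 0) := fun h => hq h.1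
          rw [if_neg hgf, if_neg hgf', ih n1 n2 hrel hpos]
    · push Not at hskip
      obtain ⟨hid, hq⟩ := hskip
      rw [pvALoop, if_neg (by push Not; exact ⟨hid, hq⟩)]
      dsimp only
      have hcq : min (item.getD "quantity" 0) 1 = 1 := by omega
      rw [hcq]
      norm_num
      -- the first simp below unfolds pvBPass on both lists
      have hc2 : n2.getD symbol 0 = n1.getD symbol 0 - 1 := by rw [hrel symbol, if_pos rfl]
      simp only [pvBPass, PySem.Dict.getD_insert_self]
      rw [PySem.Dict.get?_insert, if_neg (by decide : ¬("id" = "quantity"))]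
      simp only [hid]
      by_cases hg2 : item.getD "quantity" 0 - 1 > 0 ∧ n2.getD symbol 0 > 0
      · rw [if_pos hg2,
          if_pos (⟨hq, by omega⟩ : item.getD "quantity" 0 > 0 ∧ n1.getD symbol 0 > 0), hc2]
        have htake : min (item.getD "quantity" 0) (n1.getD symbol 0)
            = min (item.getD "quantity" 0 - 1) (n1.getD symbol 0 - 1) + 1 := by omega
        rw [htake]
        have harith : item.getD "quantity" 0 - 1 - min (item.getD "quantity" 0 - 1) (n1.getD symbol 0 - 1)
            = item.getD "quantity" 0 - (min (item.getD "quantity" 0 - 1) (n1.getD symbol 0 - 1) + 1) := by omega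
        rw [harith, PySem.Dict.insert_insert_self]
        congr 1
        refine pvBPass_congr rest _ _ (fun j => ?_)
        by_cases hj : j = symbol
        · subst hj
          rw [PySem.Dict.getD_insert_self, PySem.Dict.getD_insert_self]
          omega
        · rw [PySem.Dict.getD_insert, if_neg hj, PySem.Dict.getD_insert, if_neg hj, hrel j, if_neg hj]
      · have hmin : min (item.getD "quantity" 0) (n1.getD symbol 0) = 1 := by
          rw [hc2] at hg2; omega
        rw [if_neg hg2,
          if_pos (⟨hq, by omega⟩ : item.getD "quantity" 0 > 0 ∧ n1.getD symbol 0 > 0), hmin]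
        congr 1
        refine pvBPass_congr rest _ _ (fun j => ?_)
        by_cases hj : j = symbol
        · subst hj
          rw [PySem.Dict.getD_insert_self, hc2]
        · rw [PySem.Dict.getD_insert, if_neg hj, hrel j, if_neg hj]

theorem pv_main (syms : List Int) :
    ∀ (L : List (PySem.Dict String Int)),
    (syms.foldl (fun inv symbol => pvALoop symbol 1 inv) L).filter (fun item => item.getD "quantity" 0 > 0)
      = pvBPass (PySem.Dict.counter syms) L := by
  induction syms with
  | nil =>
    intro L
    rw [pvBPass_zero _ _ (fun j => by simp [PySem.Dict.getD_counter])]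
    rfl
  | cons s rest ih =>
    intro L
    simp only [List.foldl_cons]
    rw [ih (pvALoop s 1 L)]
    rw [pvBPass_step s L (PySem.Dict.counter (s :: rest)) (PySem.Dict.counter rest)
      (fun j => by
        simp only [PySem.Dict.getD_counter]
        by_cases hj : j = s
        · simp [hj]
        · simp [hj, Ne.symm hj])
      (by simp [PySem.Dict.getD_counter])]

-- ===== VERDICT (by name: the statement is the Claim_ definition above) =====
theorem consume_symbols_py_spec : Claim_equal_consume_symbols_py := by
  intro inventory selected_symbols _
  show consume_symbols_py inventory selected_symbols = consume_symbols_py_alt inventory selected_symbols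
  simp only [consume_symbols_py, consume_symbols_py_alt]
  rw [pvB_fold, List.nil_append, ← pv_main]
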